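-- pv_equiv track=rewrite | github.com/dadbodgeoff/1v1bro | scripts/parse_nfl_questions.py | map_correct_answer
-- ===== SOURCE A (Python) =====
-- from typing import List, Dict, Optional, Tuple
--
-- def map_correct_answer(answer_text: str, options: List[str]) -> int:
--     """
--     Map correct answer text to index (0-3).
--
--     The CSV has the full answer text in the "Correct Answer" column.
--     We need to find which option (A-D) it matches.
--
--     Returns:
--         Index 0-3 corresponding to Option A-D
--
--     Raises:
--         ValueError if answer doesn't match any option
--     """
--     answer_text = answer_text.strip()
--
--     # Try exact match first
--     for i, option in enumerate(options):
--         if option.strip() == answer_text: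
--             return i
--
--     # Try case-insensitive match
--     answer_lower = answer_text.lower()
--     for i, option in enumerate(options):
--         if option.strip().lower() == answer_lower:
--             return i
--
--     # Try partial match (answer might be truncated or have slight differences)
--     for i, option in enumerate(options):
--         opt_clean = option.strip().lower()
--         if opt_clean.startswith(answer_lower[:20]) or answer_lower.startswith(opt_clean[:20]):
--             return i
--
--     raise ValueError(f"Answer '{answer_text}' doesn't match any option: {options}")
-- ===== SOURCE B (Python) =====
-- def map_correct_answer(answer_text, options):
--     """Single ranked pass: score each option with a match tier (0 exact, 1
--     case-insensitive, 2 prefix-overlap) and keep the earliest lowest-tier index."""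
--     answer = answer_text.strip()
--     answer_lower = answer.lower()
--     best = None  # (tier, index); updated only on a strictly lower tier
--     for i, option in enumerate(options):
--         opt = option.strip()
--         opt_clean = opt.lower()
--         if opt == answer:
--             tier = 0
--         elif opt_clean == answer_lower:
--             tier = 1
--         elif opt_clean.startswith(answer_lower[:20]) or answer_lower.startswith(opt_clean[:20]):
--             tier = 2
--         else:
--             continue
--         if best is None or tier < best[0]:
--             best = (tier, i)
--     if best is None:
--         raise ValueError(f"Answer '{answer}' doesn't match any option: {options}")
--     return best[1]
-- ===== Notes on version B (the rewrite author's own statement) =====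
-- stated objective: alternative
-- what changed: Replaces A's three ordered full scans (exact, case-insensitive, prefix) by one pass that assigns each option a match tier and keeps the earliest strictly-lowest (tier, index) pair, stripping/lowering each option once instead of once per scan.
import Mathlib
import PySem

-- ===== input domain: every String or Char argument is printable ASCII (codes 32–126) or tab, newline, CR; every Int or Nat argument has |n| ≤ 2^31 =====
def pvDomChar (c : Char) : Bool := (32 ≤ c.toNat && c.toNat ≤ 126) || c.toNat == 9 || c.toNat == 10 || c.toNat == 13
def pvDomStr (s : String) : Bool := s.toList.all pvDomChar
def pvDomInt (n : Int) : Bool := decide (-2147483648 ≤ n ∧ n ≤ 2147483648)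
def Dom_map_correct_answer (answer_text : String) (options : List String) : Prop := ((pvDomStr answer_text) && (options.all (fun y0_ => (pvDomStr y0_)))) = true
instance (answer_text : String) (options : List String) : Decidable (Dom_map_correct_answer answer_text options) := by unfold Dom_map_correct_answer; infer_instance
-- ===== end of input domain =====

-- B replaces A's three ordered scans by one pass tracking the earliest lowest match tier
-- (alternative decomposition, same cost class); both raise ValueError on no match (outside Pre_).

-- ===== PORT A =====
-- first scan: option.strip() == answer_text
def mcaScan0 (a : String) : List (Int × String) → Option Int
  | [] => none
  | (i, o) :: r => if PySem.Str.strip o = a then some i else mcaScan0 a r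

-- second scan: option.strip().lower() == answer_lower
def mcaScan1 (al : String) : List (Int × String) → Option Int
  | [] => none
  | (i, o) :: r => if PySem.Str.lower (PySem.Str.strip o) = al then some i else mcaScan1 al r

-- third scan: prefix overlap on the first 20 characters
def mcaScan2 (al : String) : List (Int × String) → Option Int
  | [] => none
  | (i, o) :: r =>
    if PySem.Str.startswith (PySem.Str.lower (PySem.Str.strip o)) (PySem.Str.slice al none (some 20))
       || PySem.Str.startswith al (PySem.Str.slice (PySem.Str.lower (PySem.Str.strip o)) none (some 20))
    then some i else mcaScan2 al r

def map_correct_answer (answer_text : String) (options : List String) : Int :=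
  match mcaScan0 (PySem.Str.strip answer_text) (PySem.List.enumerate options) with
  | some i => i
  | none =>
    match mcaScan1 (PySem.Str.lower (PySem.Str.strip answer_text)) (PySem.List.enumerate options) with
    | some i => i
    | none =>
      match mcaScan2 (PySem.Str.lower (PySem.Str.strip answer_text)) (PySem.List.enumerate options) with
      | some i => i
      | none => -1  -- Python raises ValueError here; excluded by Pre_

-- ===== PORT B =====
-- match tier of one option: 0 exact, 1 case-insensitive, 2 prefix overlap, none otherwise
def mcaTier (a al o : String) : Option Nat :=
  if PySem.Str.strip o = a then some 0
  else if PySem.Str.lower (PySem.Str.strip o) = al then some 1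
  else if PySem.Str.startswith (PySem.Str.lower (PySem.Str.strip o)) (PySem.Str.slice al none (some 20))
          || PySem.Str.startswith al (PySem.Str.slice (PySem.Str.lower (PySem.Str.strip o)) none (some 20))
  then some 2
  else none

-- update the running best: replace only on a strictly lower tier
def mcaStep (best : Option (Nat × Int)) (t? : Option Nat) (i : Int) : Option (Nat × Int) :=
  match t?, best with
  | none, b => b
  | some t, none => some (t, i)
  | some t, some (tb, ib) => if t < tb then some (t, i) else some (tb, ib)

def mcaLoop (a al : String) (best : Option (Nat × Int)) : List (Int × String) → Option (Nat × Int)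
  | [] => best
  | (i, o) :: r => mcaLoop a al (mcaStep best (mcaTier a al o) i) r

def map_correct_answer_alt (answer_text : String) (options : List String) : Int :=
  match mcaLoop (PySem.Str.strip answer_text) (PySem.Str.lower (PySem.Str.strip answer_text)) none (PySem.List.enumerate options) with
  | some (_, i) => i
  | none => -1  -- Python raises ValueError here; excluded by Pre_

-- ===== PRECONDITION & SPEC =====
-- Pre_ excludes exactly the inputs where no option matches at any tier: there Python A
-- raises ValueError (and Python B raises the same ValueError).
def Pre_map_correct_answer (answer_text : String) (options : List String) : Prop :=
  (options.any (fun o =>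
    PySem.Str.startswith (PySem.Str.lower (PySem.Str.strip o))
      (PySem.Str.slice (PySem.Str.lower (PySem.Str.strip answer_text)) none (some 20))
    || PySem.Str.startswith (PySem.Str.lower (PySem.Str.strip answer_text))
      (PySem.Str.slice (PySem.Str.lower (PySem.Str.strip o)) none (some 20)))) = true

instance (answer_text : String) (options : List String) : Decidable (Pre_map_correct_answer answer_text options) := by
  unfold Pre_map_correct_answer; infer_instance

def pvWitness_map_correct_answer : String × List String := (" Yes ", ["No", "yes", "Maybe"])

def Spec_map_correct_answer (answer_text : String) (options : List String) (out : Int) : Prop := out = map_correct_answer_alt answer_text options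
instance (answer_text : String) (options : List String) (out : Int) : Decidable (Spec_map_correct_answer answer_text options out) := by unfold Spec_map_correct_answer; infer_instance

-- ===== CLAIM (what is proved, stated in full; the proofs are below) =====
def Claim_equal_map_correct_answer : Prop := ∀ (answer_text : String) (options : List String), Dom_map_correct_answer answer_text options → Pre_map_correct_answer answer_text options → Spec_map_correct_answer answer_text options (map_correct_answer answer_text options)

-- ===== LEMMAS AND PROOFS =====

-- left-biased minimum by tier (the semantic content of mcaStep)
def mcaMerge (x y : Option (Nat × Int)) : Option (Nat × Int) :=
  match x, y with
  | none, y => y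
  | x, none => x
  | some (t, i), some (t', i') => if t' < t then some (t', i') else some (t, i)

-- the best (tier, index) of a suffix, combined front-to-back
def mcaBestOf (a al : String) : List (Int × String) → Option (Nat × Int)
  | [] => none
  | (i, o) :: r => mcaMerge ((mcaTier a al o).map (fun t => (t, i))) (mcaBestOf a al r)

theorem mcaMerge_none_right (x : Option (Nat × Int)) : mcaMerge x none = x := by
  cases x <;> rfl

theorem mcaStep_eq_merge (best : Option (Nat × Int)) (t? : Option Nat) (i : Int) :
    mcaStep best t? i = mcaMerge best (t?.map (fun t => (t, i))) := by
  cases t? <;> rcases best with _ | ⟨tb, ib⟩ <;> simp [mcaStep, mcaMerge]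

theorem mcaMerge_assoc (x y z : Option (Nat × Int)) :
    mcaMerge (mcaMerge x y) z = mcaMerge x (mcaMerge y z) := by
  rcases x with _ | ⟨tx, ix⟩ <;> rcases y with _ | ⟨ty, iy⟩ <;> rcases z with _ | ⟨tz, iz⟩
  all_goals first
    | (simp [mcaMerge]; done)
    | (by_cases hab : ty < tx <;> simp [mcaMerge, hab] <;> done)
    | (by_cases hab : ty < tx <;> by_cases hbc : tz < ty <;>
        simp [mcaMerge, hab, hbc] <;> intros <;> first | rfl | omega)

theorem mcaLoop_eq_merge (a al : String) (l : List (Int × String)) :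
    ∀ best, mcaLoop a al best l = mcaMerge best (mcaBestOf a al l) := by
  induction l with
  | nil => intro best; simp [mcaLoop, mcaBestOf, mcaMerge_none_right]
  | cons p r ih =>
    intro best
    obtain ⟨i, o⟩ := p
    simp only [mcaLoop, mcaBestOf, ih, mcaStep_eq_merge, mcaMerge_assoc]

-- characterisation: the best tier/index determines the outcome of A's three scans
theorem mcaAux (a al : String) (l : List (Int × String)) :
    (∀ j, mcaBestOf a al l = some (0, j) → mcaScan0 a l = some j) ∧
    (∀ j, mcaBestOf a al l = some (1, j) → mcaScan0 a l = none ∧ mcaScan1 al l = some j) ∧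
    (∀ j, mcaBestOf a al l = some (2, j) →
      mcaScan0 a l = none ∧ mcaScan1 al l = none ∧ mcaScan2 al l = some j) ∧
    (mcaBestOf a al l = none →
      mcaScan0 a l = none ∧ mcaScan1 al l = none ∧ mcaScan2 al l = none) ∧
    (∀ t j, mcaBestOf a al l = some (t, j) → t ≤ 2) := by
  induction l with
  | nil => simp [mcaBestOf, mcaScan0, mcaScan1, mcaScan2]
  | cons p r ih =>
    obtain ⟨i, o⟩ := p
    obtain ⟨ih0, ih1, ih2, ihn, iht⟩ := ih
    rcases hbr : mcaBestOf a al r with _ | ⟨t, jr⟩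
    · by_cases h0 : PySem.Str.strip o = a <;>
        by_cases h1 : PySem.Str.lower (PySem.Str.strip o) = al <;>
        by_cases h2 : (PySem.Str.startswith (PySem.Str.lower (PySem.Str.strip o)) (PySem.Str.slice al none (some 20))
          || PySem.Str.startswith al (PySem.Str.slice (PySem.Str.lower (PySem.Str.strip o)) none (some 20))) = true <;>
        simp_all [mcaBestOf, mcaTier, mcaScan0, mcaScan1, mcaScan2, mcaMerge]
    · have ht : t ≤ 2 := iht t jr hbr
      interval_cases t <;>
        by_cases h0 : PySem.Str.strip o = a <;>
        by_cases h1 : PySem.Str.lower (PySem.Str.strip o) = al <;>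
        by_cases h2 : (PySem.Str.startswith (PySem.Str.lower (PySem.Str.strip o)) (PySem.Str.slice al none (some 20))
          || PySem.Str.startswith al (PySem.Str.slice (PySem.Str.lower (PySem.Str.strip o)) none (some 20))) = true <;>
        simp_all [mcaBestOf, mcaTier, mcaScan0, mcaScan1, mcaScan2, mcaMerge]

-- ===== VERDICT (by name: the statement is the Claim_ definition above) =====
theorem map_correct_answer_spec : Claim_equal_map_correct_answer := by
  unfold Claim_equal_map_correct_answer
  intro answer_text options _ _
  unfold Spec_map_correct_answer map_correct_answer map_correct_answer_alt
  generalize PySem.Str.strip answer_text = a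
  generalize PySem.Str.lower a = al
  generalize PySem.List.enumerate options = l
  obtain ⟨x0, x1, x2, xn, xt⟩ := mcaAux a al l
  rw [mcaLoop_eq_merge]
  simp only [mcaMerge]
  rcases hb : mcaBestOf a al l with _ | ⟨t, j⟩
  · obtain ⟨e0, e1, e2⟩ := xn hb
    simp [e0, e1, e2]
  · have ht := xt t j hb
    interval_cases t
    · have e0 := x0 j hb; simp [e0]
    · obtain ⟨e0, e1⟩ := x1 j hb; simp [e0, e1]
    · obtain ⟨e0, e1, e2⟩ := x2 j hb; simp [e0, e1, e2]
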